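-- pv_equiv track=rewrite | github.com/pypi-data/pypi-mirror-397 | packages/StevenTricks/steventricks-0.1.9.tar.gz/steventricks-0.1.9/StevenTricks/core/convert_utils.py | keyinstr
-- ===== SOURCE A (Python) =====
-- from typing import Any, Dict, Hashable, Iterable, List, Mapping, MutableMapping, Optional, Sequence, Tuple, Union
--
-- def keyinstr(
--     text: str,
--     dic: Optional[Mapping[str, Any]] = None,
--     lis: Optional[Sequence[str]] = None,
--     default: Any = "",
-- ) -> Any:
--     """
--     在文字 text 中尋找「第一個有出現的 key」，回傳對應的 value 或 key 本身。
--
--     使用方式：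
--         1. 傳入 dic：
--             keyinstr("本月房貸新增放款", dic={"房貸": "HL", "車貸": "CL"})
--             → "HL"
--         2. 傳入 lis：
--             keyinstr("本月房貸新增放款", lis=["房貸", "車貸"])
--             → "房貸"
--
--     若都沒找到，回傳 default。
--     """
--     if not isinstance(text, str):
--         return default
--
--     if dic:
--         for k, v in dic.items():
--             if k in text:
--                 return v
--     if lis:
--         for k in lis:
--             if k in text:
--                 return k
--     return default
-- ===== SOURCE B (Python) =====
-- def keyinstr(text, dic=None, lis=None, default=""):
--     # Different algorithm: index the text once by ALL of its substrings up to the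
--     # longest candidate key, then answer each key with one set lookup.
--     if not isinstance(text, str):
--         return default
--     cands = []
--     if dic:
--         cands.extend(dic.items())
--     if lis:
--         cands.extend((k, k) for k in lis)
--     if not cands:
--         return default
--     maxlen = max(len(k) for k, _ in cands)
--     n = len(text)
--     subs = set()
--     for i in range(n + 1):
--         for j in range(i, min(i + maxlen, n) + 1):
--             subs.add(text[i:j])
--     for k, v in cands:
--         if k in subs:
--             return v
--     return default
-- ===== Notes on version B (the rewrite author's own statement) =====
-- stated objective: alternative
-- what changed: B builds a one-shot set index of all substrings of text up to the longest candidate key and answers each dict/list key with a single set lookup, instead of A's per-key substring scan over the text.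
import Mathlib
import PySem

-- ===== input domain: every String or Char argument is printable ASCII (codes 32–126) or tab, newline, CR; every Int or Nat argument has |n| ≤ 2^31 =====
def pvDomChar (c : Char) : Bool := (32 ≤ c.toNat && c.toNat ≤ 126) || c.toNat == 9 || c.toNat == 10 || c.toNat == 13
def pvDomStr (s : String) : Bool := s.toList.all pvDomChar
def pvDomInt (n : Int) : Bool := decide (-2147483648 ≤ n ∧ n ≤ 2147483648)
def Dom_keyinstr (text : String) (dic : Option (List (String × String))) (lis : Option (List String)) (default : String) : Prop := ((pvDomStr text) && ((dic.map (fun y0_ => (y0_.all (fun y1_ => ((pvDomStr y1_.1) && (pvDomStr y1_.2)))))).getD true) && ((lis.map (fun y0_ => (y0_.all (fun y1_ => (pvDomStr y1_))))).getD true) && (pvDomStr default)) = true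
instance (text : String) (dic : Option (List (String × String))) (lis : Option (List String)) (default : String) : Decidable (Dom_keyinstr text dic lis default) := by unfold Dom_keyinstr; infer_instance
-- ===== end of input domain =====

-- B replaces A's per-key substring scans by a one-shot index of all substrings of
-- `text` (up to the longest candidate key) queried once per key; objective: alternative.

-- ===== PORT A =====
-- 'for k, v in dic.items(): if k in text: return v'
def pvA_dicLoop (text : String) : List (String × String) → Option String
  | [] => none
  | (k, v) :: rest => if PySem.Str.isIn k text then some v else pvA_dicLoop text rest

-- 'for k in lis: if k in text: return k'
def pvA_lisLoop (text : String) : List String → Option String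
  | [] => none
  | k :: rest => if PySem.Str.isIn k text then some k else pvA_lisLoop text rest

def keyinstr (text : String) (dic : Option (List (String × String))) (lis : Option (List String)) (default : String) : String :=
  -- 'if not isinstance(text, str)' is always False under the type convention
  match (match dic with
         | some d => if d.isEmpty then none else pvA_dicLoop text d
         | none => none) with
  | some v => v
  | none =>
    match (match lis with
           | some l => if l.isEmpty then none else pvA_lisLoop text l
           | none => none) with
    | some k => k
    | none => default

-- ===== PORT B =====
-- cands: dic items then (k, k) for lis, with Python's truthiness guards
def pvB_cands (dic : Option (List (String × String))) (lis : Option (List String)) : List (String × String) :=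
  (match dic with | some d => if d.isEmpty then [] else d | none => []) ++
  (match lis with | some l => if l.isEmpty then [] else l.map (fun k => (k, k)) | none => [])

-- subs: the set of all slices text[i:j] with 0 ≤ i ≤ n, i ≤ j ≤ min(i+maxlen, n)
def pvB_subs (text : String) (maxlen : Int) : PySem.Set String :=
  (PySem.List.pyRange 0 (PySem.Str.len text + 1)).foldl
    (fun s i =>
      (PySem.List.pyRange i (min (i + maxlen) (PySem.Str.len text) + 1)).foldl
        (fun s j => s.add (PySem.Str.slice text (some i) (some j))) s)
    PySem.Set.empty

-- maxlen = max(len(k) for k, _ in cands)   (fold over the tail, head as start)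
def pvB_maxlen (c : String × String) (rest : List (String × String)) : Int :=
  rest.foldl (fun m kv => max m (PySem.Str.len kv.1)) (PySem.Str.len c.1)

-- 'for k, v in cands: if k in subs: return v'
def pvB_scan (subs : PySem.Set String) (default : String) : List (String × String) → String
  | [] => default
  | (k, v) :: rest => if subs.contains k then v else pvB_scan subs default rest

def keyinstr_alt (text : String) (dic : Option (List (String × String))) (lis : Option (List String)) (default : String) : String :=
  match pvB_cands dic lis with
  | [] => default
  | c :: rest =>
    pvB_scan (pvB_subs text (pvB_maxlen c rest)) default (c :: rest)

-- ===== PRECONDITION & SPEC =====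
def Spec_keyinstr (text : String) (dic : Option (List (String × String))) (lis : Option (List String)) (default : String) (out : String) : Prop := out = keyinstr_alt text dic lis default
instance (text : String) (dic : Option (List (String × String))) (lis : Option (List String)) (default : String) (out : String) : Decidable (Spec_keyinstr text dic lis default out) := by unfold Spec_keyinstr; infer_instance

-- ===== CLAIM (what is proved, stated in full; the proofs are below) =====
def Claim_equal_keyinstr : Prop := ∀ (text : String) (dic : Option (List (String × String))) (lis : Option (List String)) (default : String), Dom_keyinstr text dic lis default → Spec_keyinstr text dic lis default (keyinstr text dic lis default)

-- ===== LEMMAS AND PROOFS =====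

-- reference scan: first candidate whose key is a substring of text (by Str.isIn)
def pvScanIsIn (text : String) (default : String) : List (String × String) → String
  | [] => default
  | (k, v) :: rest => if PySem.Str.isIn k text then v else pvScanIsIn text default rest

theorem pvScanIsIn_append (text default : String) (d ls : List (String × String)) :
    pvScanIsIn text default (d ++ ls) =
      match pvA_dicLoop text d with
      | some v => v
      | none => pvScanIsIn text default ls := by
  induction d with
  | nil => simp [pvA_dicLoop]
  | cons c rest ih =>
    obtain ⟨k, v⟩ := c
    by_cases h : PySem.Chars.isIn k.toList text.toList = true <;>
      simp [pvA_dicLoop, pvScanIsIn, h, ih]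

theorem pvScanIsIn_map (text default : String) (l : List String) :
    pvScanIsIn text default (l.map (fun k => (k, k))) =
      match pvA_lisLoop text l with
      | some k => k
      | none => default := by
  induction l with
  | nil => simp [pvA_lisLoop, pvScanIsIn]
  | cons k rest ih =>
    by_cases h : PySem.Chars.isIn k.toList text.toList = true <;>
      simp [pvA_lisLoop, pvScanIsIn, h, ih]

-- the lis part of A equals the scan of its (k, k) candidates
theorem pv_lis_eq (text default : String) (lis : Option (List String)) :
    (match (match lis with
            | some l => if l.isEmpty then none else pvA_lisLoop text l
            | none => none) with
     | some k => k
     | none => default) =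
    pvScanIsIn text default
      (match lis with
       | some l => if l.isEmpty then [] else l.map (fun k => (k, k))
       | none => []) := by
  cases lis with
  | none => rfl
  | some l =>
    show (match (if l.isEmpty then none else pvA_lisLoop text l) with
          | some k => k
          | none => default) =
        pvScanIsIn text default (if l.isEmpty then [] else l.map (fun k => (k, k)))
    by_cases hl : l.isEmpty
    · rw [if_pos hl, if_pos hl]; rfl
    · rw [if_neg hl, if_neg hl, pvScanIsIn_map]

-- A as a single scan over B's candidate list
theorem keyinstr_eq_scan (text : String) (dic : Option (List (String × String)))
    (lis : Option (List String)) (default : String) :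
    keyinstr text dic lis default = pvScanIsIn text default (pvB_cands dic lis) := by
  unfold keyinstr pvB_cands
  cases dic with
  | none => exact pv_lis_eq text default lis
  | some d =>
    show (match (if d.isEmpty then none else pvA_dicLoop text d) with
          | some v => v
          | none =>
            match (match lis with
                   | some l => if l.isEmpty then none else pvA_lisLoop text l
                   | none => none) with
            | some k => k
            | none => default) =
        pvScanIsIn text default
          ((if d.isEmpty then [] else d) ++
            (match lis with
             | some l => if l.isEmpty then [] else l.map (fun k => (k, k))
             | none => []))
    by_cases hd : d.isEmpty
    · rw [if_pos hd, if_pos hd]; exact pv_lis_eq text default lis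
    · rw [if_neg hd, if_neg hd, pvScanIsIn_append]
      cases hA : pvA_dicLoop text d with
      | some v => rfl
      | none => exact pv_lis_eq text default lis

-- membership in one inner add-loop of pvB_subs
theorem pv_mem_inner_add {β : Type} [BEq β] [LawfulBEq β] (f : Int → β) (l : List Int)
    (s : PySem.Set β) (y : β) :
    y ∈ l.foldl (fun s j => s.add (f j)) s ↔ y ∈ s ∨ ∃ j ∈ l, y = f j := by
  rw [← PySem.Set.update_map_eq_foldl_add, PySem.Set.mem_update]
  simp only [List.mem_map]
  constructor
  · rintro (h | ⟨j, hj, rfl⟩)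
    · exact Or.inl h
    · exact Or.inr ⟨j, hj, rfl⟩
  · rintro (h | ⟨j, hj, rfl⟩)
    · exact Or.inl h
    · exact Or.inr ⟨j, hj, rfl⟩

-- membership in the nested add-fold that builds subs
theorem pv_mem_foldl_add {β : Type} [BEq β] [LawfulBEq β] (f : Int → Int → β)
    (g : Int → List Int) (l : List Int) (s₀ : PySem.Set β) (y : β) :
    y ∈ l.foldl (fun s i => (g i).foldl (fun s j => s.add (f i j)) s) s₀ ↔
      y ∈ s₀ ∨ ∃ i ∈ l, ∃ j ∈ g i, y = f i j := by
  induction l generalizing s₀ with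
  | nil => simp
  | cons i rest ih =>
    rw [List.foldl_cons, ih, pv_mem_inner_add]
    simp only [List.mem_cons]
    constructor
    · rintro ((h | ⟨j, hj, rfl⟩) | ⟨i', hi', j, hj, rfl⟩)
      · exact Or.inl h
      · exact Or.inr ⟨i, Or.inl rfl, j, hj, rfl⟩
      · exact Or.inr ⟨i', Or.inr hi', j, hj, rfl⟩
    · rintro (h | ⟨i', hi' | hi', j, hj, rfl⟩)
      · exact Or.inl (Or.inl h)
      · subst hi'; exact Or.inl (Or.inr ⟨j, hj, rfl⟩)
      · exact Or.inr ⟨i', hi', j, hj, rfl⟩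

-- a key no longer than maxlen is in the substring index iff it occurs in text
theorem pv_mem_subs_iff (text k : String) (maxlen : Int)
    (hk : (k.toList.length : Int) ≤ maxlen) :
    k ∈ pvB_subs text maxlen ↔ PySem.Str.isIn k text = true := by
  unfold pvB_subs
  rw [pv_mem_foldl_add, PySem.Str.isIn_iff_infix]
  simp only [PySem.Set.empty, List.not_mem_nil, false_or, PySem.List.mem_pyRange_one]
  constructor
  · rintro ⟨i, ⟨hi0, hin⟩, j, ⟨hij, hjm⟩, rfl⟩
    obtain ⟨a, rfl⟩ := Int.eq_ofNat_of_zero_le hi0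
    obtain ⟨b, rfl⟩ := Int.eq_ofNat_of_zero_le (le_trans hi0 hij)
    rw [PySem.Str.toList_slice, PySem.Chars.slice_eq_listSlice, PySem.List.slice_natCast]
    exact ((List.take_prefix _ _).isInfix).trans (List.drop_suffix _ _).isInfix
  · rintro ⟨pre, suf, hsplit⟩
    have hlen : pre.length + k.toList.length + suf.length = text.toList.length := by
      rw [← hsplit]; simp only [List.length_append]
    have hn : PySem.Str.len text = (text.toList.length : Int) := by
      simp [PySem.Str.len]
    refine ⟨(pre.length : Int), ⟨by positivity, ?_⟩,
      ((pre.length + k.toList.length : Nat) : Int), ⟨by omega, ?_⟩, ?_⟩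
    · rw [hn]; omega
    · rw [hn, Int.lt_add_one_iff, le_min_iff]
      constructor
      · push_cast; omega
      · push_cast; omega
    · apply String.toList_inj.mp
      rw [PySem.Str.toList_slice, PySem.Chars.slice_eq_listSlice, PySem.List.slice_natCast,
        ← hsplit]
      rw [Nat.add_sub_cancel_left, List.drop_append_of_le_length (by simp),
        List.drop_append]
      simp

-- the two scans agree when every candidate key fits under maxlen
theorem pv_scan_eq (text default : String) (maxlen : Int) (cs : List (String × String))
    (h : ∀ kv ∈ cs, PySem.Str.len kv.1 ≤ maxlen) :
    pvB_scan (pvB_subs text maxlen) default cs = pvScanIsIn text default cs := by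
  induction cs with
  | nil => rfl
  | cons c rest ih =>
    obtain ⟨k, v⟩ := c
    have hk : (k.toList.length : Int) ≤ maxlen := by
      have := h (k, v) (List.mem_cons_self ..)
      simpa [PySem.Str.len] using this
    have hmem := pv_mem_subs_iff text k maxlen hk
    have hrest := ih (fun kv hkv => h kv (List.mem_cons_of_mem _ hkv))
    by_cases hin : PySem.Str.isIn k text = true
    · have hc : (pvB_subs text maxlen).contains k = true :=
        (PySem.Set.contains_iff _ _).mpr (hmem.mpr hin)
      have hin' : PySem.Chars.isIn k.toList text.toList = true := by
        simpa using hin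
      simp [pvB_scan, pvScanIsIn, hin', hmem.mpr hin]
    · have hnm : k ∉ pvB_subs text maxlen := fun hm => hin (hmem.mp hm)
      have hin' : ¬ PySem.Chars.isIn k.toList text.toList = true := by
        simpa using hin
      simp [pvB_scan, pvScanIsIn, hnm, hin', hrest]

-- every candidate key is at most pvB_maxlen long
theorem pv_le_maxlen (c : String × String) (rest : List (String × String)) :
    ∀ kv ∈ c :: rest, PySem.Str.len kv.1 ≤ pvB_maxlen c rest := by
  have h := PySem.List.le_foldl_max (rest.map (fun kv => PySem.Str.len kv.1))
    (PySem.Str.len c.1)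
  rw [List.foldl_map] at h
  intro kv hkv
  unfold pvB_maxlen
  rcases List.mem_cons.mp hkv with rfl | h1
  · exact h.1
  · exact h.2 _ (List.mem_map_of_mem h1)

-- ===== VERDICT (by name: the statement is the Claim_ definition above) =====
theorem keyinstr_spec : Claim_equal_keyinstr := by
  intro text dic lis default _
  unfold Spec_keyinstr
  rw [keyinstr_eq_scan]
  unfold keyinstr_alt
  cases hc : pvB_cands dic lis with
  | nil => rfl
  | cons c rest => rw [← pv_scan_eq text default (pvB_maxlen c rest) _ (pv_le_maxlen c rest)]
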